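-- pv_equiv track=rewrite | github.com/utilizatorvalid/python_lab | lab2/ex4.py | func
-- ===== SOURCE A (Python) =====
-- def func(list_a, list_b):
--     '''
--     Function returns
--     :param list_a:
--     :param list_b:
--     :return: list_a and list_b, list_a or list_b, list_a - list_b, list_b - list_a
--     '''
--
--     def remove_dublicates(numbers):
--         new_list = []
--         for number in numbers:
--             if number not in new_list:
--                 new_list.append(number)
--         return new_list
--
--     list_a = remove_dublicates(list_a)
--     list_b = remove_dublicates(list_b)
--     a_and_b = [x for x in list_a if x in list_b]
--     a_or_b = remove_dublicates(list_a+list_b)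
--     a_minus_b = [x for x in list_a if x not in list_b]
--     b_minus_a = [x for x in list_b if x not in list_a]
--
--     return a_and_b, a_or_b, a_minus_b, b_minus_a
-- ===== SOURCE B (Python) =====
-- def func(list_a, list_b):
--     sa, sb = set(list_a), set(list_b)
--     seen = set()
--     both, union, only_a, only_b = [], [], [], []
--     for x in list_a + list_b:
--         if x in seen:
--             continue
--         seen.add(x)
--         union.append(x)
--         if x in sa and x in sb:
--             both.append(x)
--         elif x in sa:
--             only_a.append(x)
--         else:
--             only_b.append(x)
--     return both, union, only_a, only_b
-- ===== Notes on version B (the rewrite author's own statement) =====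
-- stated objective: faster
-- what changed: Single classification pass over the concatenation list_a+list_b with one 'seen' set: each first occurrence is routed into intersection / a-only / b-only and simultaneously appended to the union, replacing A's three dedup passes and three separate comprehensions.
import Mathlib
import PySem

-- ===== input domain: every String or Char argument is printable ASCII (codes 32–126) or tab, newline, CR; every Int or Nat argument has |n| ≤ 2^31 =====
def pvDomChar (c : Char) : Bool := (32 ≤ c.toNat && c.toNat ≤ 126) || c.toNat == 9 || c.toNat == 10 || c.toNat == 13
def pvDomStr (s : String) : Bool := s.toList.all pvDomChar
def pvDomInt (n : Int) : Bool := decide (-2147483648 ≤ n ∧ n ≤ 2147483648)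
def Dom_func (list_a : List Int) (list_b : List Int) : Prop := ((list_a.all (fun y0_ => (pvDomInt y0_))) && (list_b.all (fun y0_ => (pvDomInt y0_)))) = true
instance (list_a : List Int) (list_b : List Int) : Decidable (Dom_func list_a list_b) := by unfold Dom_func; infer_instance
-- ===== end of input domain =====

-- B replaces A's three dedup passes and three comprehensions by ONE classification pass
-- over list_a ++ list_b with a single 'seen' set; objective: faster (linear vs quadratic).

-- ===== PORT A =====
-- remove_dublicates: A's nested helper, literal fold over the same growing list
def removeDublicates (numbers : List Int) : List Int :=
  numbers.foldl (fun newList number =>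
    if newList.contains number then newList else newList ++ [number]) []

def func (list_a : List Int) (list_b : List Int) : List Int × List Int × List Int × List Int :=
  let la := removeDublicates list_a
  let lb := removeDublicates list_b
  let aAndB := la.filter (fun x => lb.contains x)
  let aOrB := removeDublicates (la ++ lb)
  let aMinusB := la.filter (fun x => !lb.contains x)
  let bMinusA := lb.filter (fun x => !la.contains x)
  (aAndB, aOrB, aMinusB, bMinusA)

-- ===== PORT B =====
-- the body of Source B's single for-loop (skip if seen, else add to seen, union, and one bucket)
def altStep (sa sb : PySem.Set Int)
    (st : PySem.Set Int × List Int × List Int × List Int × List Int) (x : Int) :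
    PySem.Set Int × List Int × List Int × List Int × List Int :=
  let (seen, both, union, onlyA, onlyB) := st
  if PySem.Set.contains seen x then st
  else
    let seen := PySem.Set.add seen x
    let union := union ++ [x]
    if PySem.Set.contains sa x && PySem.Set.contains sb x then
      (seen, both ++ [x], union, onlyA, onlyB)
    else if PySem.Set.contains sa x then
      (seen, both, union, onlyA ++ [x], onlyB)
    else
      (seen, both, union, onlyA, onlyB ++ [x])

def func_alt (list_a : List Int) (list_b : List Int) : List Int × List Int × List Int × List Int :=
  let sa := PySem.Set.ofList list_a
  let sb := PySem.Set.ofList list_b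
  let r := (list_a ++ list_b).foldl (altStep sa sb) (PySem.Set.empty, [], [], [], [])
  (r.2.1, r.2.2.1, r.2.2.2.1, r.2.2.2.2)

-- ===== PRECONDITION & SPEC =====
def Spec_func (list_a : List Int) (list_b : List Int) (out : List Int × List Int × List Int × List Int) : Prop := out = func_alt list_a list_b
instance (list_a : List Int) (list_b : List Int) (out : List Int × List Int × List Int × List Int) : Decidable (Spec_func list_a list_b out) := by unfold Spec_func; infer_instance

-- ===== CLAIM (what is proved, stated in full; the proofs are below) =====
def Claim_equal_func : Prop := ∀ (list_a : List Int) (list_b : List Int), Dom_func list_a list_b → Spec_func list_a list_b (func list_a list_b)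

-- ===== LEMMAS AND PROOFS =====

-- the list of first occurrences of l that are not already in s, in order
def firstNew (s l : List Int) : List Int :=
  match l with
  | [] => []
  | x :: r => if s.contains x then firstNew s r else x :: firstNew (s ++ [x]) r

theorem mem_firstNew (l : List Int) : ∀ (s : List Int) (x : Int),
    x ∈ firstNew s l ↔ x ∈ l ∧ x ∉ s := by
  induction l with
  | nil => simp [firstNew]
  | cons y r ih =>
    intro s x
    by_cases hy : y ∈ s
    · simp only [firstNew, List.contains_eq_mem, hy, decide_true, if_true, ih]
      constructor
      · rintro ⟨h1, h2⟩; exact ⟨List.mem_cons_of_mem _ h1, h2⟩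
      · rintro ⟨h1, h2⟩
        rcases List.mem_cons.mp h1 with h | h
        · exact absurd (h ▸ hy) h2
        · exact ⟨h, h2⟩
    · simp only [firstNew, List.contains_eq_mem, hy, decide_false, Bool.false_eq_true,
        if_false, List.mem_cons, ih, List.mem_append]
      constructor
      · rintro (rfl | ⟨h1, h2⟩)
        · exact ⟨Or.inl rfl, hy⟩
        · exact ⟨Or.inr h1, fun h => h2 (Or.inl h)⟩
      · rintro ⟨rfl | h1, h2⟩
        · exact Or.inl rfl
        · by_cases hx : x = y
          · exact Or.inl hx
          · exact Or.inr ⟨h1, by rintro (h | h); exact h2 h; exact hx (by simpa using h)⟩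

theorem firstNew_filter (l : List Int) : ∀ (s : List Int),
    firstNew s l = (firstNew [] l).filter (fun x => !s.contains x) := by
  induction l with
  | nil => intro s; simp [firstNew]
  | cons y r ih =>
    intro s
    have hD : firstNew ([] : List Int) (y :: r)
        = y :: (firstNew [] r).filter (fun x => !([y] : List Int).contains x) := by
      simp only [firstNew, List.contains_nil, Bool.false_eq_true, if_false, List.nil_append]
      rw [ih [y]]
    rw [hD]
    by_cases hy : s.contains y
    · simp only [firstNew, hy, if_true, List.filter_cons, Bool.not_true, Bool.false_eq_true,
        if_false]
      rw [ih s, List.filter_filter]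
      apply List.filter_congr
      intro x _
      by_cases hxy : x = y
      · subst hxy
        have hxm : x ∈ s := by simpa using hy
        simp [hxm]
      · simp [List.contains_eq_mem, hxy]
    · simp only [firstNew, hy, Bool.false_eq_true, if_false, List.filter_cons, Bool.not_false,
        if_true]
      rw [ih (s ++ [y]), List.filter_filter]
      congr 1
      apply List.filter_congr
      intro x _
      simp only [List.contains_eq_mem, List.mem_append, List.mem_singleton]
      by_cases hxy : x = y <;> by_cases hxs : x ∈ s <;> simp [hxy, hxs]

theorem firstNew_append (l1 l2 : List Int) : ∀ (s : List Int),
    firstNew s (l1 ++ l2) = firstNew s l1 ++ firstNew (s ++ firstNew s l1) l2 := by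
  induction l1 with
  | nil => intro s; simp [firstNew]
  | cons y r ih =>
    intro s
    by_cases hy : s.contains y
    · simp only [List.cons_append, firstNew, hy, if_true]
      exact ih s
    · simp only [List.cons_append, firstNew, hy, Bool.false_eq_true, if_false, ih (s ++ [y]),
        List.cons_append, List.append_assoc, List.nil_append]

theorem nodup_firstNew (l : List Int) : ∀ (s : List Int), (firstNew s l).Nodup := by
  induction l with
  | nil => intro s; simp [firstNew]
  | cons y r ih =>
    intro s
    by_cases hy : s.contains y
    · have hym : y ∈ s := by simpa using hy
      simpa [firstNew, hym, hy] using ih s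
    · simp only [firstNew, hy, Bool.false_eq_true, if_false, List.nodup_cons]
      refine ⟨fun hmem => ?_, ih (s ++ [y])⟩
      rcases (mem_firstNew r (s ++ [y]) y).mp hmem with ⟨_, h2⟩
      exact h2 (by simp)

theorem firstNew_eq_self (l : List Int) : ∀ (s : List Int), l.Nodup →
    (∀ x ∈ l, x ∉ s) → firstNew s l = l := by
  induction l with
  | nil => intro s _ _; simp [firstNew]
  | cons y r ih =>
    intro s hnd hdisj
    have hy : ¬ s.contains y = true := by
      simp only [List.contains_eq_mem, decide_eq_true_eq]
      exact hdisj y List.mem_cons_self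
    rcases List.nodup_cons.mp hnd with ⟨hyr, hr⟩
    simp only [firstNew, hy, Bool.false_eq_true, if_false, List.cons.injEq, true_and]
    apply ih (s ++ [y]) hr
    intro x hx
    simp only [List.mem_append, List.mem_singleton]
    rintro (h | h)
    · exact hdisj x (List.mem_cons_of_mem _ hx) h
    · exact hyr (h ▸ hx)

theorem firstNew_nil_idem (l : List Int) :
    firstNew [] (firstNew [] l) = firstNew [] l := by
  apply firstNew_eq_self _ _ (nodup_firstNew l [])
  intro x _
  simp

-- A's fold-dedup, started from any prefix, appends exactly the new first occurrences
theorem removeFold_eq (l : List Int) : ∀ (s : List Int),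
    l.foldl (fun nl x => if nl.contains x then nl else nl ++ [x]) s = s ++ firstNew s l := by
  induction l with
  | nil => intro s; simp [firstNew]
  | cons y r ih =>
    intro s
    by_cases hy : s.contains y
    · simp only [List.foldl_cons, hy, if_true, firstNew]
      exact ih s
    · simp only [List.foldl_cons, hy, Bool.false_eq_true, if_false, firstNew]
      rw [ih (s ++ [y])]
      simp

theorem removeDublicates_eq (l : List Int) : removeDublicates l = firstNew [] l := by
  unfold removeDublicates
  simpa using removeFold_eq l []

-- the single pass of B, from an arbitrary state whose seen component is a raw list
theorem altFold_eq (sa sb : PySem.Set Int) (l : List Int) :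
    ∀ (s b u oa ob : List Int),
    l.foldl (altStep sa sb) (s, b, u, oa, ob) =
      (s ++ firstNew s l,
       b ++ (firstNew s l).filter (fun x => PySem.Set.contains sa x && PySem.Set.contains sb x),
       u ++ firstNew s l,
       oa ++ (firstNew s l).filter (fun x => PySem.Set.contains sa x && !PySem.Set.contains sb x),
       ob ++ (firstNew s l).filter (fun x => !PySem.Set.contains sa x)) := by
  induction l with
  | nil => intro s b u oa ob; simp [firstNew]
  | cons y r ih =>
    intro s b u oa ob
    by_cases hy : s.contains y
    · have hc : PySem.Set.contains s y = true := hy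
      have hfn : firstNew s (y :: r) = firstNew s r := by
        simp only [firstNew]
        rw [if_pos hy]
      have hstep : altStep sa sb (s, b, u, oa, ob) y = (s, b, u, oa, ob) := by
        simp only [altStep]
        rw [if_pos hc]
      rw [List.foldl_cons, hstep, hfn]
      exact ih s b u oa ob
    · have hm : y ∉ s := fun hmm => hy (by simpa using hmm)
      have hc : PySem.Set.contains s y = false := by
        simp [PySem.Set.contains, List.contains_eq_mem, hm]
      have hadd : PySem.Set.add s y = s ++ [y] := by
        simp [PySem.Set.add, PySem.Set.contains, List.contains_eq_mem, hm]
      have hfn : firstNew s (y :: r) = y :: firstNew (s ++ [y]) r := by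
        simp only [firstNew]
        rw [if_neg hy]
      have hstep : altStep sa sb (s, b, u, oa, ob) y =
          (if PySem.Set.contains sa y && PySem.Set.contains sb y then
             (s ++ [y], b ++ [y], u ++ [y], oa, ob)
           else if PySem.Set.contains sa y then (s ++ [y], b, u ++ [y], oa ++ [y], ob)
           else (s ++ [y], b, u ++ [y], oa, ob ++ [y])) := by
        simp only [altStep]
        rw [if_neg (by rw [hc]; exact Bool.false_ne_true)]
        rw [hadd]
      rw [List.foldl_cons, hstep, hfn]
      by_cases ha : PySem.Set.contains sa y = true
      · by_cases hb : PySem.Set.contains sb y = true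
        · rw [if_pos (by rw [ha, hb]; rfl), ih]
          have ham : y ∈ sa := by simpa using ha
          have hbm : y ∈ sb := by simpa using hb
          simp [List.filter_cons, ham, hbm, List.append_assoc]
        · have hb' : PySem.Set.contains sb y = false := eq_false_of_ne_true hb
          rw [if_neg (by rw [ha, hb']; exact Bool.false_ne_true), if_pos ha, ih]
          have ham : y ∈ sa := by simpa using ha
          have hbm : y ∉ sb := by simpa using hb
          simp [List.filter_cons, ham, hbm, List.append_assoc]
      · have ha' : PySem.Set.contains sa y = false := eq_false_of_ne_true ha
        rw [if_neg (by rw [ha']; exact Bool.false_ne_true),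
          if_neg (by rw [ha']; exact Bool.false_ne_true), ih]
        have ham : y ∉ sa := by simpa using ha
        simp [List.filter_cons, ham, List.append_assoc]

-- pushing one filter through the two halves of an append, with simplified predicates
theorem filter_split (A B : List Int) (p pa pb : Int → Bool)
    (hA : ∀ x ∈ A, p x = pa x) (hB : ∀ x ∈ B, p x = pb x) :
    (A ++ B).filter p = A.filter pa ++ B.filter pb := by
  rw [List.filter_append, List.filter_congr hA, List.filter_congr hB]

-- ===== VERDICT (by name: the statement is the Claim_ definition above) =====
theorem func_spec : Claim_equal_func := by
  intro la lb _
  unfold Spec_func func func_alt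
  dsimp only
  rw [altFold_eq]
  simp only [PySem.Set.empty, List.nil_append]
  rw [removeDublicates_eq la, removeDublicates_eq lb,
    removeDublicates_eq (firstNew [] la ++ firstNew [] lb)]
  rw [firstNew_append la lb, firstNew_append (firstNew [] la) (firstNew [] lb)]
  simp only [List.nil_append]
  rw [firstNew_nil_idem la, firstNew_filter lb (firstNew [] la),
    firstNew_filter (firstNew [] lb) (firstNew [] la), firstNew_nil_idem lb]
  have hmemA : ∀ x : Int, x ∈ firstNew [] la ↔ x ∈ la := by
    intro x; rw [mem_firstNew]; simp
  have hmemB : ∀ x : Int, x ∈ firstNew [] lb ↔ x ∈ lb := by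
    intro x; rw [mem_firstNew]; simp
  have hsa : ∀ x : Int, PySem.Set.contains (PySem.Set.ofList la) x = decide (x ∈ la) := by
    intro x
    simp [PySem.Set.contains, List.contains_eq_mem, PySem.Set.mem_ofList]
  have hsb : ∀ x : Int, PySem.Set.contains (PySem.Set.ofList lb) x = decide (x ∈ lb) := by
    intro x
    simp [PySem.Set.contains, List.contains_eq_mem, PySem.Set.mem_ofList]
  refine Prod.ext ?_ (Prod.ext rfl (Prod.ext ?_ ?_))
  · -- intersection: the lb-part of the union contributes nothing
    symm
    have h1 : ∀ x ∈ firstNew [] la,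
        (PySem.Set.contains (PySem.Set.ofList la) x && PySem.Set.contains (PySem.Set.ofList lb) x)
          = (firstNew [] lb).contains x := by
      intro x hx
      simp [hsa, hsb, (hmemA x).mp hx, List.contains_eq_mem, hmemB]
    have h2 : ∀ x ∈ (firstNew [] lb).filter (fun x => !(firstNew [] la).contains x),
        (PySem.Set.contains (PySem.Set.ofList la) x && PySem.Set.contains (PySem.Set.ofList lb) x)
          = false := by
      intro x hx
      have hcond := (List.mem_filter.mp hx).2
      have hxa : x ∉ la := by
        simpa [List.contains_eq_mem, hmemA] using hcond
      simp [hsa, hxa]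
    rw [filter_split _ _ _ _ _ h1 h2]
    simp [List.contains_eq_mem]
    apply List.filter_congr
    intro x hx
    simp [List.contains_eq_mem]
  · -- a minus b: the lb-part of the union contributes nothing
    symm
    have h1 : ∀ x ∈ firstNew [] la,
        (PySem.Set.contains (PySem.Set.ofList la) x && !PySem.Set.contains (PySem.Set.ofList lb) x)
          = !(firstNew [] lb).contains x := by
      intro x hx
      simp [hsa, hsb, (hmemA x).mp hx, List.contains_eq_mem, hmemB]
    have h2 : ∀ x ∈ (firstNew [] lb).filter (fun x => !(firstNew [] la).contains x),
        (PySem.Set.contains (PySem.Set.ofList la) x && !PySem.Set.contains (PySem.Set.ofList lb) x)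
          = false := by
      intro x hx
      have hxb : x ∈ lb := (hmemB x).mp (List.mem_filter.mp hx).1
      simp [hsb, hxb]
    rw [filter_split _ _ _ _ _ h1 h2]
    simp [List.contains_eq_mem]
  · -- b minus a: the la-part of the union contributes nothing
    symm
    have h1 : ∀ x ∈ firstNew [] la,
        (!PySem.Set.contains (PySem.Set.ofList la) x) = false := by
      intro x hx
      simp [hsa, (hmemA x).mp hx]
    have h2 : ∀ x ∈ (firstNew [] lb).filter (fun x => !(firstNew [] la).contains x),
        (!PySem.Set.contains (PySem.Set.ofList la) x) = true := by
      intro x hx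
      have hcond := (List.mem_filter.mp hx).2
      have hxa : x ∉ la := by
        simpa [List.contains_eq_mem, hmemA] using hcond
      simp [hsa, hxa]
    rw [filter_split _ _ _ _ _ h1 h2]
    simp [List.contains_eq_mem]
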